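-- pv_equiv track=rewrite | github.com/roby-avo/alpaca | src/build_postgres_entities.py | _pick_primary_label
-- ===== SOURCE A (Python) =====
-- from collections.abc import Mapping, Sequence
--
-- PRIMARY_LABEL_LANGUAGE_PREFERENCE = ("en", "mul")
--
-- def _pick_primary_label(labels: Mapping[str, str]) -> str:
--     for language in PRIMARY_LABEL_LANGUAGE_PREFERENCE:
--         preferred = labels.get(language)
--         if isinstance(preferred, str) and preferred.strip():
--             return preferred.strip()
--     for language in sorted(labels):
--         value = labels[language]
--         if isinstance(value, str):
--             candidate = value.strip()
--             if candidate:
--                 return candidate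
--     return ""
-- ===== SOURCE B (Python) =====
-- PRIMARY_LABEL_LANGUAGE_PREFERENCE = ("en", "mul")
--
-- def _pick_primary_label(labels):
--     for language in PRIMARY_LABEL_LANGUAGE_PREFERENCE:
--         preferred = labels.get(language)
--         if isinstance(preferred, str) and preferred.strip():
--             return preferred.strip()
--     best_key = None
--     best_val = ""
--     for key, value in labels.items():
--         if isinstance(value, str):
--             candidate = value.strip()
--             if candidate and (best_key is None or key < best_key):
--                 best_key = key
--                 best_val = candidate
--     return best_val
-- ===== Notes on version B (the rewrite author's own statement) =====
-- stated objective: faster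
-- what changed: The sorted-keys fallback loop is replaced by a single pass over labels.items() that tracks the lexicographically smallest key whose stripped value is non-empty, so no sorted key list is built.
import Mathlib
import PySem

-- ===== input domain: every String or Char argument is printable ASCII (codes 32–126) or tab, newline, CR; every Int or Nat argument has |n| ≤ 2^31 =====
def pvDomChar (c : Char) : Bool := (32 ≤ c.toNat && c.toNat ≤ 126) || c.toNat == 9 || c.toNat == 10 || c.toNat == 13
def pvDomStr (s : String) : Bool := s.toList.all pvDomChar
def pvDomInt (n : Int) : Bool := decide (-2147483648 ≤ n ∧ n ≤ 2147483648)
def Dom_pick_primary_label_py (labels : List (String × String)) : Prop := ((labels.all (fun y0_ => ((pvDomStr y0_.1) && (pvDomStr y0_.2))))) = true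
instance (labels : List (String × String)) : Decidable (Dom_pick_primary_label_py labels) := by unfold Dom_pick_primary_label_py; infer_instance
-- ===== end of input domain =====

-- B replaces A's sorted-keys fallback by a single min-tracking pass over the dict items (no sorted key list); same return value, proved equal on all inputs.


-- ===== PORT A =====
-- labels.get(k) on the assoc-list representation of the dict (first binding wins, per the type convention)
def pvLookup (labels : List (String × String)) (k : String) : Option String :=
  (labels.find? (fun p => p.1 == k)).map Prod.snd

-- the loop over PRIMARY_LABEL_LANGUAGE_PREFERENCE = ("en", "mul"); IDENTICAL in A and in B, so shared by both ports.
-- (the isinstance(preferred, str) guard is always true under the type convention: values are str)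
def pvPrefLoop (labels : List (String × String)) : List String → Option String
  | [] => none
  | l :: rest =>
    match pvLookup labels l with
    | some preferred =>
        if PySem.Str.strip preferred ≠ "" then some (PySem.Str.strip preferred)
        else pvPrefLoop labels rest
    | none => pvPrefLoop labels rest

-- A's fallback: 'for language in sorted(labels): …'. Each key comes from labels itself,
-- so labels[language] never raises; '(pvLookup …).getD ""' is the total form of that lookup.
def pvALoop (labels : List (String × String)) : List String → String
  | [] => ""
  | k :: rest =>
    let candidate := PySem.Str.strip ((pvLookup labels k).getD "")
    if candidate ≠ "" then candidate else pvALoop labels rest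

-- sorted(labels) iterates the dict's (distinct) keys in sorted order: on the assoc list, sorted(dedup of the keys)
def pick_primary_label_py (labels : List (String × String)) : String :=
  match pvPrefLoop labels ["en", "mul"] with
  | some c => c
  | none =>
      pvALoop labels (PySem.List.sorted (PySem.List.dedup (labels.map Prod.fst)) (fun k => k) false)

-- ===== PORT B =====
-- labels.items() under the assoc-list convention: the distinct keys in first-occurrence order, each with its (first) value
def pvItems (labels : List (String × String)) : List (String × String) :=
  (PySem.List.dedup (labels.map Prod.fst)).map (fun k => (k, (pvLookup labels k).getD ""))

-- B's single pass: keep the smallest key whose stripped value is non-empty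
def pvBLoop : List (String × String) → Option String → String → String
  | [], _, bestVal => bestVal
  | (k, v) :: rest, bestKey, bestVal =>
    let candidate := PySem.Str.strip v
    if candidate ≠ "" && (match bestKey with | none => true | some b => decide (k < b)) then
      pvBLoop rest (some k) candidate
    else
      pvBLoop rest bestKey bestVal

def pick_primary_label_py_alt (labels : List (String × String)) : String :=
  match pvPrefLoop labels ["en", "mul"] with
  | some c => c
  | none => pvBLoop (pvItems labels) none ""

-- ===== PRECONDITION & SPEC =====
def Spec_pick_primary_label_py (labels : List (String × String)) (out : String) : Prop := out = pick_primary_label_py_alt labels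
instance (labels : List (String × String)) (out : String) : Decidable (Spec_pick_primary_label_py labels out) := by unfold Spec_pick_primary_label_py; infer_instance

-- ===== CLAIM (what is proved, stated in full; the proofs are below) =====
def Claim_equal_pick_primary_label_py : Prop := ∀ (labels : List (String × String)), Dom_pick_primary_label_py labels → Spec_pick_primary_label_py labels (pick_primary_label_py labels)

-- ===== LEMMAS AND PROOFS =====
-- the stripped value looked up at key k
def pvV (labels : List (String × String)) (k : String) : String :=
  PySem.Str.strip ((pvLookup labels k).getD "")

-- the min-combining step B's loop folds with (on keys)
def pvBest (labels : List (String × String)) (acc : Option String) (k : String) : Option String :=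
  if pvV labels k ≠ "" then
    match acc with
    | none => some k
    | some b => if k < b then some k else some b
  else acc

def pvValOf (labels : List (String × String)) : Option String → String
  | none => ""
  | some b => pvV labels b

theorem pvBest_eq_min (labels : List (String × String)) (acc : Option String) (k : String) :
    pvBest labels acc k
      = if pvV labels k ≠ "" then some (match acc with | none => k | some b => min k b) else acc := by
  unfold pvBest
  split_ifs with h
  · cases acc with
    | none => rfl
    | some b =>
      by_cases hkb : k < b
      · simp [hkb, min_eq_left hkb.le]
      · simp [hkb, min_eq_right (not_lt.mp hkb)]
  · rfl

theorem pvBest_leftComm (labels : List (String × String)) (acc : Option String) (a b : String) :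
    pvBest labels (pvBest labels acc a) b = pvBest labels (pvBest labels acc b) a := by
  simp only [pvBest_eq_min]
  by_cases ha : pvV labels a ≠ ""
  · by_cases hb : pvV labels b ≠ ""
    · rw [if_pos ha, if_pos hb, if_pos ha, if_pos hb]
      cases acc with
      | none => simp [min_comm]
      | some c => simp [min_left_comm]
    · simp [ha, hb]
  · by_cases hb : pvV labels b ≠ "" <;> simp [ha, hb]

theorem pvBLoop_eq (labels : List (String × String)) :
    ∀ (ks : List String) (bk : Option String),
      pvBLoop (ks.map (fun k => (k, (pvLookup labels k).getD ""))) bk (pvValOf labels bk)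
        = pvValOf labels (ks.foldl (pvBest labels) bk) := by
  intro ks
  induction ks with
  | nil => intro bk; rfl
  | cons k ks ih =>
    intro bk
    simp only [List.map_cons, List.foldl_cons, pvBLoop]
    by_cases hv : PySem.Str.strip ((pvLookup labels k).getD "") ≠ ""
    · cases bk with
      | none =>
        rw [if_pos (by simp [hv]),
          show pvBest labels none k = some k by simp [pvBest, pvV, hv]]
        exact ih (some k)
      | some b =>
        by_cases hkb : k < b
        · rw [if_pos (by simp [hv, hkb]),
            show pvBest labels (some b) k = some k by simp [pvBest, pvV, hv, hkb]]
          exact ih (some k)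
        · rw [if_neg (by simp [hv, hkb]),
            show pvBest labels (some b) k = some b by simp [pvBest, pvV, hv, hkb]]
          exact ih (some b)
    · rw [if_neg (by simp [hv]),
        show pvBest labels bk k = bk by simp [pvBest, pvV, hv]]
      exact ih bk

theorem pvKeep (labels : List (String × String)) :
    ∀ (ks : List String) (b : String), (∀ x ∈ ks, b < x) →
      ks.foldl (pvBest labels) (some b) = some b := by
  intro ks
  induction ks with
  | nil => intro b _; rfl
  | cons x ks ih =>
    intro b hb
    have hbx : b < x := hb x (List.mem_cons_self ..)
    have hstep : pvBest labels (some b) x = some b := by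
      simp [pvBest, lt_asymm hbx]
    rw [List.foldl_cons, hstep]
    exact ih b (fun y hy => hb y (List.mem_cons_of_mem _ hy))

theorem pvALoop_eq (labels : List (String × String)) :
    ∀ (ks : List String), ks.Pairwise (· < ·) →
      pvALoop labels ks = pvValOf labels (ks.foldl (pvBest labels) none) := by
  intro ks
  induction ks with
  | nil => intro _; rfl
  | cons k ks ih =>
    intro hp
    rw [List.pairwise_cons] at hp
    simp only [pvALoop, List.foldl_cons]
    by_cases hv : PySem.Str.strip ((pvLookup labels k).getD "") ≠ ""
    · rw [if_pos hv,
        show pvBest labels none k = some k by simp [pvBest, pvV, hv],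
        pvKeep labels ks k hp.1]
      rfl
    · rw [if_neg hv,
        show pvBest labels none k = none by simp [pvBest, pvV, hv]]
      exact ih hp.2

-- ===== VERDICT (by name: the statement is the Claim_ definition above) =====
theorem pick_primary_label_py_spec : Claim_equal_pick_primary_label_py := by
  intro labels _
  unfold Spec_pick_primary_label_py pick_primary_label_py pick_primary_label_py_alt
  cases hp : pvPrefLoop labels ["en", "mul"] with
  | some c => rfl
  | none =>
    simp only []
    have hB : pvBLoop (pvItems labels) none ""
        = pvValOf labels ((PySem.List.dedup (labels.map Prod.fst)).foldl (pvBest labels) none) :=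
      pvBLoop_eq labels (PySem.List.dedup (labels.map Prod.fst)) none
    have hpair : (PySem.List.sorted (PySem.List.dedup (labels.map Prod.fst)) (fun k => k) false).Pairwise (· < ·) := by
      rw [PySem.List.dedup_eq_ofList]
      exact PySem.List.sorted_ofList_pairwise_lt (labels.map Prod.fst)
    have hperm : (PySem.List.sorted (PySem.List.dedup (labels.map Prod.fst)) (fun k => k) false).Perm
        (PySem.List.dedup (labels.map Prod.fst)) :=
      PySem.List.sorted_perm ..
    have hA := pvALoop_eq labels _ hpair
    rw [hA, hB]
    haveI : RightCommutative (pvBest labels) := ⟨fun acc a b => pvBest_leftComm labels acc a b⟩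
    rw [hperm.foldl_eq]
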